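-- pv_equiv track=rewrite | github.com/bureerak/PSIT-Y1S1 | pscp_y1s1/finalmock2/[Mock Final 2023] Taking Turns.py | alternate_list
-- ===== SOURCE A (Python) =====
-- def alternate_list(lst):
--     """ sd """
--     result = []
--     left = 0
--     right = len(lst) - 1
--
--
--     if left <= right:
--         result.append(lst[right])
--         right -= 1
--
--
--     if left <= right:
--         pattern = ['right', 'right', 'left', 'left']
--         index = 0  # ตำแหน่งใน pattern
--         while left <= right:
--             if pattern[index] == 'right' and left <= right:
--                 result.append(lst[right])  # เลือกจากฝั่งขวา
--                 right -= 1
--             elif pattern[index] == 'left' and left <= right: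
--                 result.append(lst[left])  # เลือกจากฝั่งซ้าย
--                 left += 1
--             # เปลี่ยนตำแหน่งใน pattern และวนซ้ำเมื่อครบ 4 ขั้นตอน
--             index = (index + 1) % len(pattern)
--
--     return result
-- ===== SOURCE B (Python) =====
-- def alternate_list(lst):
--     """ sd """
--     n = len(lst)
--     cycle = ['right', 'right', 'left', 'left']
--     schedule = [('right' if k == 0 else cycle[(k - 1) % 4]) for k in range(n)]
--     front = iter(lst)
--     back = iter(reversed(lst))
--     return [next(back) if d == 'right' else next(front) for d in schedule]
-- ===== Notes on version B (the rewrite author's own statement) =====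
-- stated objective: simpler
-- what changed: Replaces A's two-pointer while loop with a mutable pattern cursor and left<=right guards by precomputing the full n-entry direction schedule and consuming a forward and a backward iterator according to it.
import Mathlib
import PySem

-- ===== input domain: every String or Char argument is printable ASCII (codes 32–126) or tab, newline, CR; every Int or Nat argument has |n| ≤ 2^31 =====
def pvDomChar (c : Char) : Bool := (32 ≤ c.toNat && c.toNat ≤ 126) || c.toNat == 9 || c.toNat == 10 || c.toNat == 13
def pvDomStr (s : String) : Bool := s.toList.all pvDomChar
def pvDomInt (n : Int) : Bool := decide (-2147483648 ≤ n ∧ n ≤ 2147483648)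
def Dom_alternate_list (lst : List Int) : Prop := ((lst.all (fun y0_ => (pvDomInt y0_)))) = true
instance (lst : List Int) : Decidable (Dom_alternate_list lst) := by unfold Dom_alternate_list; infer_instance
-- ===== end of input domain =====

-- B replaces A's two-pointer while loop (left/right indices, a mutable pattern cursor and
-- left<=right guards) by precomputing the full direction schedule for exactly n picks and
-- consuming a forward and a backward iterator according to it (objective: simpler decomposition).

-- ===== PORT A =====
-- Transliteration of A's while loop: state (left, right, index, result).
-- lst[right] / lst[left] are ported with pyGetD; the loop guard guarantees the index is
-- always in range, so the default 0 is never returned and the port is exact.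
def loopA (lst : List Int) (left right : Int) (index : Nat) (result : List Int) : List Int :=
  if _h : left ≤ right then
    if (["right", "right", "left", "left"].getD index "") = "right" then
      loopA lst left (right - 1) ((index + 1) % 4) (result ++ [PySem.List.pyGetD lst right 0])
    else
      loopA lst (left + 1) right ((index + 1) % 4) (result ++ [PySem.List.pyGetD lst left 0])
  else result
termination_by (right + 1 - left).toNat
decreasing_by all_goals omega

def alternate_list (lst : List Int) : List Int :=
  let result : List Int := []
  let left : Int := 0
  let right : Int := (lst.length : Int) - 1
  let st :=
    if left ≤ right then (result ++ [PySem.List.pyGetD lst right 0], right - 1)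
    else (result, right)
  if left ≤ st.2 then loopA lst left st.2 0 st.1 else st.1

-- ===== PORT B =====
-- next(back) / next(front): the schedule has exactly n entries, so neither iterator is
-- ever exhausted and headD's default 0 is never returned; the port is exact.
def pickB (schedule : List String) (front back : List Int) : List Int :=
  match schedule with
  | [] => []
  | d :: ds =>
    if d = "right" then back.headD 0 :: pickB ds front back.tail
    else front.headD 0 :: pickB ds front.tail back

def alternate_list_alt (lst : List Int) : List Int :=
  let n := lst.length
  let cycle : List String := ["right", "right", "left", "left"]
  let schedule := (List.range n).map (fun k => if k = 0 then "right" else cycle.getD ((k - 1) % 4) "")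
  pickB schedule lst lst.reverse

-- ===== PRECONDITION & SPEC =====
def Spec_alternate_list (lst : List Int) (out : List Int) : Prop := out = alternate_list_alt lst
instance (lst : List Int) (out : List Int) : Decidable (Spec_alternate_list lst out) := by unfold Spec_alternate_list; infer_instance

-- ===== CLAIM (what is proved, stated in full; the proofs are below) =====
def Claim_equal_alternate_list : Prop := ∀ (lst : List Int), Dom_alternate_list lst → Spec_alternate_list lst (alternate_list lst)

-- ===== LEMMAS AND PROOFS =====

-- the schedule of directions for m remaining picks, starting at pattern position i
def schedTail (i m : Nat) : List String :=
  (List.range m).map (fun j => ["right", "right", "left", "left"].getD ((i + j) % 4) "")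

lemma schedTail_mod (i m : Nat) : schedTail (i % 4) m = schedTail i m := by
  simp [schedTail, Nat.mod_add_mod]

lemma schedTail_succ (i m : Nat) :
    schedTail i (m + 1) =
      (["right", "right", "left", "left"].getD (i % 4) "") :: schedTail (i + 1) m := by
  simp [schedTail, List.range_succ_eq_map, List.map_map, Function.comp]
  intro j _
  have h : i + (j + 1) = i + 1 + j := by omega
  rw [h]

lemma take_reverse_cons (lst : List Int) (t : Nat) (h1 : 1 ≤ t) (h2 : t ≤ lst.length) :
    (lst.take t).reverse = lst.getD (t - 1) 0 :: (lst.take (t - 1)).reverse := by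
  obtain ⟨s, rfl⟩ : ∃ s, t = s + 1 := ⟨t - 1, by omega⟩
  have hs : s < lst.length := by omega
  rw [List.take_add_one, List.getElem?_eq_getElem hs]
  simp [List.getD_eq_getElem?_getD, List.getElem?_eq_getElem hs]

lemma drop_head_cons (lst : List Int) (l : Nat) (h : l < lst.length) :
    lst.drop l = lst.getD l 0 :: lst.drop (l + 1) := by
  rw [List.drop_eq_getElem_cons h]
  simp [List.getD_eq_getElem?_getD, List.getElem?_eq_getElem h]

lemma loopA_eq (lst : List Int) :
    ∀ (m l t i : Nat) (res : List Int), i < 4 → l + m = t → t ≤ lst.length →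
      loopA lst (l : Int) ((t : Int) - 1) i res =
        res ++ pickB (schedTail i m) (lst.drop l) ((lst.take t).reverse) := by
  intro m
  induction m with
  | zero =>
    intro l t i res hi hlt ht
    rw [loopA]
    have : ¬ ((l : Int) ≤ (t : Int) - 1) := by omega
    simp [this, schedTail, pickB]
  | succ m ih =>
    intro l t i res hi hlt ht
    have hcond : (l : Int) ≤ (t : Int) - 1 := by omega
    have ht1 : 1 ≤ t := by omega
    have hl : l < lst.length := by omega
    rw [loopA]
    rw [dif_pos hcond]
    have hgetA : PySem.List.pyGetD lst ((t : Int) - 1) 0 = lst.getD (t - 1) 0 := by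
      have : (t : Int) - 1 = ((t - 1 : Nat) : Int) := by omega
      rw [this, PySem.List.pyGetD_natCast]
    have hgetL : PySem.List.pyGetD lst (l : Int) 0 = lst.getD l 0 := by
      rw [PySem.List.pyGetD_natCast]
    have hsched := schedTail_succ i m
    have hback := take_reverse_cons lst t ht1 ht
    have hfront := drop_head_cons lst l hl
    interval_cases i
    · -- i = 0 : "right"
      rw [if_pos (by decide)]
      have h2 : (t : Int) - 1 - 1 = ((t - 1 : Nat) : Int) - 1 := by omega
      rw [h2, ih l (t - 1) 1 _ (by omega) (by omega) (by omega)]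
      rw [hsched, hback]
      simp [pickB, hgetA]
    · -- i = 1 : "right"
      rw [if_pos (by decide)]
      have h2 : (t : Int) - 1 - 1 = ((t - 1 : Nat) : Int) - 1 := by omega
      rw [h2, ih l (t - 1) 2 _ (by omega) (by omega) (by omega)]
      rw [hsched, hback]
      simp [pickB, hgetA]
    · -- i = 2 : "left"
      rw [if_neg (by decide)]
      have h2 : (l : Int) + 1 = ((l + 1 : Nat) : Int) := by omega
      rw [h2, ih (l + 1) t 3 _ (by omega) (by omega) ht]
      rw [hsched, hfront]
      simp [pickB, hgetL]
    · -- i = 3 : "left"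
      rw [if_neg (by decide)]
      have h2 : (l : Int) + 1 = ((l + 1 : Nat) : Int) := by omega
      rw [h2, ih (l + 1) t 0 _ (by omega) (by omega) ht]
      rw [← schedTail_mod 4 m] at hsched
      rw [hsched, hfront]
      simp [pickB, hgetL]

lemma schedule_eq (n : Nat) (h : 1 ≤ n) :
    (List.range n).map
        (fun k => if k = 0 then "right" else ["right", "right", "left", "left"].getD ((k - 1) % 4) "") =
      "right" :: schedTail 0 (n - 1) := by
  obtain ⟨s, rfl⟩ : ∃ s, n = s + 1 := ⟨n - 1, by omega⟩
  simp [List.range_succ_eq_map, List.map_map, Function.comp, schedTail]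

-- ===== VERDICT (by name: the statement is the Claim_ definition above) =====
theorem alternate_list_spec : Claim_equal_alternate_list := by
  intro lst _
  unfold Spec_alternate_list
  by_cases h0 : lst.length = 0
  · rw [List.eq_nil_of_length_eq_zero h0]
    rfl
  · have h1 : 1 ≤ lst.length := by omega
    have hgetA : PySem.List.pyGetD lst ((lst.length : Int) - 1) 0 = lst.getD (lst.length - 1) 0 := by
      have : (lst.length : Int) - 1 = ((lst.length - 1 : Nat) : Int) := by omega
      rw [this, PySem.List.pyGetD_natCast]
    have hA : alternate_list lst =
        lst.getD (lst.length - 1) 0 ::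
          pickB (schedTail 0 (lst.length - 1)) lst ((lst.take (lst.length - 1)).reverse) := by
      have hc : (0 : Int) ≤ (lst.length : Int) - 1 := by omega
      simp only [alternate_list, if_pos hc]
      by_cases h2 : 2 ≤ lst.length
      · have hc2 : (0 : Int) ≤ (lst.length : Int) - 1 - 1 := by omega
        simp only [hc2, if_pos]
        have he : (lst.length : Int) - 1 - 1 = ((lst.length - 1 : Nat) : Int) - 1 := by omega
        have h0e : (0 : Int) = ((0 : Nat) : Int) := rfl
        rw [he, h0e, loopA_eq lst (lst.length - 1) 0 (lst.length - 1) 0 _ (by omega) (by omega) (by omega)]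
        simp [hgetA]
      · have hn1 : lst.length = 1 := by omega
        have hc2 : ¬ ((0 : Int) ≤ (lst.length : Int) - 1 - 1) := by omega
        simp only [hc2, if_false]
        simp [hn1, schedTail, pickB, PySem.List.pyGetD_zero, List.getD_eq_getElem?_getD]
    have hB : alternate_list_alt lst =
        lst.getD (lst.length - 1) 0 ::
          pickB (schedTail 0 (lst.length - 1)) lst ((lst.take (lst.length - 1)).reverse) := by
      unfold alternate_list_alt
      simp only [schedule_eq lst.length h1]
      have hrev : lst.reverse = (lst.take lst.length).reverse := by rw [List.take_length]
      rw [hrev, take_reverse_cons lst lst.length h1 le_rfl]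
      simp [pickB]
    rw [hA, hB]
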